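-- pv_equiv track=rewrite | github.com/gencaysyn/2048AI | Game.py | dist_equals
-- ===== SOURCE A (Python) =====
-- def dist_equals(matrix):
--     my_map = {}
--     result = 0
--     for i in range(len(matrix)):
--         for j in range(len(matrix[i])):
--             if matrix[i][j] != 0:
--                 try:
--                     p = my_map[matrix[i][j]]
--                     result += (abs(i - p[0]) + abs(j - p[1])) * matrix[i][j]
--                 except KeyError:
--                     my_map[matrix[i][j]] = (i, j)
--     return -result
-- ===== SOURCE B (Python) =====
-- def dist_equals(matrix):
--     groups = {}
--     for i, row in enumerate(matrix):
--         for j, v in enumerate(row):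
--             if v != 0:
--                 groups.setdefault(v, []).append((i, j))
--     result = 0
--     for v, ps in groups.items():
--         i0, j0 = ps[0]
--         for i, j in ps[1:]:
--             result += (abs(i - i0) + abs(j - j0)) * v
--     return -result
-- ===== Notes on version B (the rewrite author's own statement) =====
-- stated objective: alternative
-- what changed: A makes one pass keeping a first-occurrence map and accumulating each repeat's distance on the fly; B instead groups all nonzero cell positions by value into a dict in a first pass, then in a second pass sums each group's distances to its first (anchor) position.
import Mathlib
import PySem

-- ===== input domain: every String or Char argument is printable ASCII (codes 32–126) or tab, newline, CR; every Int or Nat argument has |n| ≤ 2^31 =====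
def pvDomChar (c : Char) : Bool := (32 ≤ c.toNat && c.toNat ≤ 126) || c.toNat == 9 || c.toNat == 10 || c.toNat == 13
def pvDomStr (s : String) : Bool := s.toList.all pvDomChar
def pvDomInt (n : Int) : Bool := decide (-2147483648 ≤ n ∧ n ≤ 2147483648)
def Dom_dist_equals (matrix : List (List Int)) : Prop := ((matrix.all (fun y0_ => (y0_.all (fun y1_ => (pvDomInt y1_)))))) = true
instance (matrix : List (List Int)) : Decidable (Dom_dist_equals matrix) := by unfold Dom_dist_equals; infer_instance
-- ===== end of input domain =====

-- B replaces A's single first-occurrence-map pass by two passes — group all nonzero cell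
-- positions by value into a dict, then sum each group's distances to its first position —
-- an alternative decomposition of the same computation (no speed claim).

-- ===== PORT A =====
def dist_equals (matrix : List (List Int)) : Int :=
  let st : PySem.Dict Int (Int × Int) × Int :=
    (PySem.List.pyRange 0 (PySem.List.len matrix)).foldl
      (fun st i =>
        (PySem.List.pyRange 0 (PySem.List.len (PySem.List.pyGetD matrix i []))).foldl
          (fun st j =>
            let v := PySem.List.pyGetD (PySem.List.pyGetD matrix i []) j 0
            if v ≠ 0 then
              match st.1.get? v with
              | some p => (st.1, st.2 + (|i - p.1| + |j - p.2|) * v)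
              | none => (st.1.insert v (i, j), st.2)
            else st)
          st)
      (PySem.Dict.empty, 0)
  Neg.neg st.2  -- return -result

-- ===== PORT B =====
def dist_equals_alt (matrix : List (List Int)) : Int :=
  let groups : PySem.Dict Int (List (Int × Int)) :=
    (PySem.List.enumerate matrix).foldl
      (fun g ir =>
        (PySem.List.enumerate ir.2).foldl
          (fun g jv =>
            if jv.2 ≠ 0 then g.modify jv.2 [] (fun ps => ps ++ [(ir.1, jv.1)]) else g)
          g)
      PySem.Dict.empty
  let result : Int :=
    groups.items.foldl
      (fun result vps =>
        match vps.2 with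
        | [] => result  -- unreachable: every stored position list is nonempty
        | p0 :: rest =>
          rest.foldl (fun r q => r + (|q.1 - p0.1| + |q.2 - p0.2|) * vps.1) result)
      0
  Neg.neg result  -- return -result

-- ===== PRECONDITION & SPEC =====
def Spec_dist_equals (matrix : List (List Int)) (out : Int) : Prop := out = dist_equals_alt matrix
instance (matrix : List (List Int)) (out : Int) : Decidable (Spec_dist_equals matrix out) := by unfold Spec_dist_equals; infer_instance

-- ===== CLAIM (what is proved, stated in full; the proofs are below) =====
def Claim_equal_dist_equals : Prop := ∀ (matrix : List (List Int)), Dom_dist_equals matrix → Spec_dist_equals matrix (dist_equals matrix)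

-- ===== LEMMAS AND PROOFS =====

-- cost of a repeated cell at q anchored at p0, with value v
def pvCost (q p0 : Int × Int) (v : Int) : Int := (|q.1 - p0.1| + |q.2 - p0.2|) * v

-- row-major cell list: (value, (i, j))
def pvCells (matrix : List (List Int)) : List (Int × (Int × Int)) :=
  (PySem.List.enumerate matrix).flatMap
    (fun ir => (PySem.List.enumerate ir.2).map (fun jv => (jv.2, (ir.1, jv.1))))

-- A's loop body on one nonzero cell
def pvStepA (st : PySem.Dict Int (Int × Int) × Int) (c : Int × (Int × Int)) :
    PySem.Dict Int (Int × Int) × Int :=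
  match st.1.get? c.1 with
  | some p => (st.1, st.2 + pvCost c.2 p c.1)
  | none => (st.1.insert c.1 c.2, st.2)

-- A's accumulated result as a function of the first-occurrence map
def pvF (m : PySem.Dict Int (Int × Int)) : List (Int × (Int × Int)) → Int
  | [] => 0
  | c :: t =>
    match m.get? c.1 with
    | some q => pvCost c.2 q c.1 + pvF m t
    | none => pvF (m.insert c.1 c.2) t

-- positions of value v, in order
def pvPos (v : Int) (l : List (Int × (Int × Int))) : List (Int × Int) :=
  (l.filter (fun c => c.1 == v)).map (fun c => c.2)

-- B's per-value summand
def pvEntry (v : Int) (ps : List (Int × Int)) : Int :=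
  match ps with
  | [] => 0
  | p0 :: rest => (rest.map (fun q => pvCost q p0 v)).sum

-- B's total, grouped by value
def pvSum (l : List (Int × (Int × Int))) : Int :=
  ((PySem.Set.ofList (l.map (fun c => c.1))).map (fun v => pvEntry v (pvPos v l))).sum

lemma pv_foldl_pyRange_enum_aux {α β : Type} (d : α) (f : β → Int → α → β) :
    ∀ (xs pre : List α) (init : β),
      (PySem.List.pyRange (pre.length : Int) ((pre.length : Int) + xs.length)).foldl
        (fun acc i => f acc i (PySem.List.pyGetD (pre ++ xs) i d)) init
      = (PySem.List.enumerate xs (pre.length : Int)).foldl (fun acc p => f acc p.1 p.2) init := by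
  intro xs
  induction xs with
  | nil =>
    intro pre init
    simp [PySem.List.enumerate, PySem.List.pyRange]
  | cons x t ih =>
    intro pre init
    have hlt : (pre.length : Int) < (pre.length : Int) + (x :: t).length := by simp
    rw [PySem.List.pyRange_one_cons hlt]
    simp only [List.foldl_cons]
    have hget : PySem.List.pyGetD (pre ++ x :: t) (pre.length : Int) d = x := by
      rw [PySem.List.pyGetD_natCast]
      simp [List.getD]
    rw [hget]
    have h2 := ih (pre ++ [x]) (f init (pre.length : Int) x)
    simp only [List.length_append, List.length_cons, List.length_nil, List.append_assoc,
      List.singleton_append] at h2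
    simp only [List.length_cons] 
    push_cast at h2 ⊢
    rw [show ((pre.length : Int) + 1 + (t.length : Int)) = (pre.length : Int) + ((t.length : Int) + 1) by ring] at h2
    rw [h2]
    simp [PySem.List.enumerate]

lemma pv_foldl_pyRange_enum {α β : Type} (xs : List α) (d : α) (f : β → Int → α → β) (init : β) :
    (PySem.List.pyRange 0 (PySem.List.len xs)).foldl
      (fun acc i => f acc i (PySem.List.pyGetD xs i d)) init
    = (PySem.List.enumerate xs).foldl (fun acc p => f acc p.1 p.2) init := by
  have h := pv_foldl_pyRange_enum_aux d f xs [] init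
  simpa using h

lemma pv_A_norm (matrix : List (List Int)) :
    dist_equals matrix
      = -(((pvCells matrix).filter (fun c => c.1 != 0)).foldl pvStepA (PySem.Dict.empty, 0)).2 := by
  have houter :
      dist_equals matrix
        = Neg.neg (((PySem.List.enumerate matrix).foldl
            (fun (st : PySem.Dict Int (Int × Int) × Int) ir =>
              (PySem.List.pyRange 0 (PySem.List.len ir.2)).foldl
                (fun st j =>
                  let v := PySem.List.pyGetD ir.2 j 0
                  if v ≠ 0 then
                    match st.1.get? v with
                    | some p => (st.1, st.2 + (|ir.1 - p.1| + |j - p.2|) * v)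
                    | none => (st.1.insert v (ir.1, j), st.2)
                  else st)
                st)
            (PySem.Dict.empty, 0)).2) :=
    congrArg (fun z => Neg.neg (Prod.snd z))
      (pv_foldl_pyRange_enum matrix []
        (fun st i row =>
          (PySem.List.pyRange 0 (PySem.List.len row)).foldl
            (fun st j =>
              let v := PySem.List.pyGetD row j 0
              if v ≠ 0 then
                match st.1.get? v with
                | some p => (st.1, st.2 + (|i - p.1| + |j - p.2|) * v)
                | none => (st.1.insert v (i, j), st.2)
              else st)
            st)
        (PySem.Dict.empty, 0))
  rw [houter]
  have hbody :
      (fun (st : PySem.Dict Int (Int × Int) × Int) (ir : Int × List Int) =>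
          (PySem.List.pyRange 0 (PySem.List.len ir.2)).foldl
            (fun st j =>
              let v := PySem.List.pyGetD ir.2 j 0
              if v ≠ 0 then
                match st.1.get? v with
                | some p => (st.1, st.2 + (|ir.1 - p.1| + |j - p.2|) * v)
                | none => (st.1.insert v (ir.1, j), st.2)
              else st)
            st)
        = (fun st ir =>
            (PySem.List.enumerate ir.2).foldl
              (fun st jv =>
                if jv.2 ≠ 0 then
                  match st.1.get? jv.2 with
                  | some p => (st.1, st.2 + (|ir.1 - p.1| + |jv.1 - p.2|) * jv.2)
                  | none => (st.1.insert jv.2 (ir.1, jv.1), st.2)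
                else st)
              st) :=
    funext fun st => funext fun ir =>
      pv_foldl_pyRange_enum ir.2 0
        (fun st j v =>
          if v ≠ 0 then
            match st.1.get? v with
            | some p => (st.1, st.2 + (|ir.1 - p.1| + |j - p.2|) * v)
            | none => (st.1.insert v (ir.1, j), st.2)
          else st)
        st
  rw [hbody]
  rw [List.foldl_filter, pvCells, List.foldl_flatMap]
  congr 1
  congr 1
  apply PySem.List.foldl_congr_mem
  intro st ir _
  rw [List.foldl_map]
  apply PySem.List.foldl_congr_mem
  intro st jv _
  by_cases h : jv.2 = 0
  · simp [h]
  · simp [h, pvStepA, pvCost]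

lemma pv_B_groups (matrix : List (List Int)) :
    ((PySem.List.enumerate matrix).foldl
      (fun (g : PySem.Dict Int (List (Int × Int))) ir =>
        (PySem.List.enumerate ir.2).foldl
          (fun g jv =>
            if jv.2 ≠ 0 then g.modify jv.2 [] (fun ps => ps ++ [(ir.1, jv.1)]) else g)
          g)
      PySem.Dict.empty)
    = ((pvCells matrix).filter (fun c => c.1 != 0)).foldl
        (fun g c => g.modify c.1 [] (fun ps => ps ++ [c.2])) PySem.Dict.empty := by
  rw [List.foldl_filter, pvCells, List.foldl_flatMap]
  apply PySem.List.foldl_congr_mem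
  intro g ir _
  rw [List.foldl_map]
  apply PySem.List.foldl_congr_mem
  intro g jv _
  by_cases h : jv.2 = 0
  · simp [h]
  · simp [h]

lemma pv_B_norm (matrix : List (List Int)) :
    dist_equals_alt matrix = -(pvSum ((pvCells matrix).filter (fun c => c.1 != 0))) := by
  simp only [dist_equals_alt]
  rw [pv_B_groups]
  set pl := (pvCells matrix).filter (fun c => c.1 != 0) with hpl
  set g : PySem.Dict Int (List (Int × Int)) :=
    pl.foldl (fun g c => g.modify c.1 [] (fun ps => ps ++ [c.2])) PySem.Dict.empty with hg
  have hnodup : g.keys.Nodup :=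
    PySem.Dict.nodup_keys_foldl_modify_key pl (fun c => c.1) []
      (fun _ c => (fun ps => ps ++ [c.2])) PySem.Dict.empty (by simp [PySem.Dict.empty, PySem.Dict.keys])
  have hkeys : g.keys = PySem.Set.ofList (pl.map (fun c => c.1)) :=
    PySem.Dict.keys_foldl_modify_key pl (fun c => c.1) []
      (fun _ c => (fun ps => ps ++ [c.2])) PySem.Dict.empty
  have hget : ∀ v, g.getD v [] = pvPos v pl := by
    intro v
    have h := PySem.Dict.getD_foldl_modify_append pl PySem.Dict.empty v
    simpa [pvPos] using h
  rw [PySem.Dict.items_eq_map_keys g hnodup []]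
  rw [List.foldl_map]
  have hstep : ∀ (r : Int) (k : Int),
      (match (k, g.getD k []).2 with
       | [] => r
       | p0 :: rest => rest.foldl (fun r q => r + (|q.1 - p0.1| + |q.2 - p0.2|) * (k, g.getD k []).1) r)
      = r + pvEntry k (g.getD k []) := by
    intro r k
    cases hps : g.getD k [] with
    | nil => simp [pvEntry]
    | cons p0 rest =>
      simp only [pvEntry]
      have h2 := PySem.List.foldl_add rest (fun q => pvCost q p0 k) r
      simpa [pvCost] using h2
  calc Neg.neg (g.keys.foldl (fun r k =>
          match (k, g.getD k []).2 with
          | [] => r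
          | p0 :: rest => rest.foldl (fun r q => r + (|q.1 - p0.1| + |q.2 - p0.2|) * (k, g.getD k []).1) r) 0)
      = Neg.neg (g.keys.foldl (fun r k => r + pvEntry k (g.getD k [])) 0) := by
        congr 1
        apply PySem.List.foldl_congr_mem
        intro r k _
        exact hstep r k
    _ = -(pvSum pl) := by
        rw [PySem.List.foldl_add g.keys (fun k => pvEntry k (g.getD k [])) 0]
        simp only [pvSum, hkeys, zero_add]
        congr 1
        exact congrArg List.sum (List.map_congr_left (fun k _ => by rw [hget]))

lemma pv_foldA (l : List (Int × (Int × Int))) :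
    ∀ (m : PySem.Dict Int (Int × Int)) (r : Int),
      (l.foldl pvStepA (m, r)).2 = r + pvF m l := by
  induction l with
  | nil => intro m r; simp [pvF]
  | cons c t ih =>
    intro m r
    rw [List.foldl_cons]
    cases h : m.get? c.1 with
    | some q =>
      have : pvStepA (m, r) c = (m, r + pvCost c.2 q c.1) := by simp [pvStepA, h]
      rw [this, ih, pvF]
      rw [h]
      ring
    | none =>
      have : pvStepA (m, r) c = (m.insert c.1 c.2, r) := by simp [pvStepA, h]
      rw [this, ih, pvF]
      rw [h]

lemma pv_F_append (l : List (Int × (Int × Int))) :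
    ∀ (m : PySem.Dict Int (Int × Int)) (v : Int) (p : Int × Int),
      pvF m (l ++ [(v, p)])
        = pvF m l +
          (match (m.get? v).or ((l.find? (fun c => c.1 == v)).map (fun c => c.2)) with
           | some q => pvCost p q v
           | none => 0) := by
  induction l with
  | nil =>
    intro m v p
    cases h : m.get? v <;> simp [pvF, h]
  | cons c t ih =>
    intro m v p
    simp only [List.cons_append, pvF]
    cases h : m.get? c.1 with
    | some q =>
      rw [ih m v p]
      have harg :
          (m.get? v).or (((c :: t).find? (fun c => c.1 == v)).map (fun c => c.2))
            = (m.get? v).or ((t.find? (fun c => c.1 == v)).map (fun c => c.2)) := by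
        by_cases hv : c.1 = v
        · rw [hv] at h; simp [h, Option.some_or]
        · rw [List.find?_cons_of_neg (by simp [hv])]
      rw [harg]
      ring
    | none =>
      rw [ih (m.insert c.1 c.2) v p]
      by_cases hv : c.1 = v
      · subst hv
        rw [PySem.Dict.get?_insert_self, List.find?_cons_of_pos (by simp), h]
        simp
      · rw [PySem.Dict.get?_insert_of_ne m c.2 (Ne.symm hv),
            List.find?_cons_of_neg (by simp [hv])]

lemma pv_sum_update {V : List Int} (hnd : V.Nodup) {v : Int} (hv : v ∈ V)
    (f g : Int → Int) (δ : Int) (hg : ∀ w ∈ V, w ≠ v → g w = f w) (hgv : g v = f v + δ) :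
    (V.map g).sum = (V.map f).sum + δ := by
  induction V with
  | nil => simp at hv
  | cons w W ih =>
    rcases List.nodup_cons.mp hnd with ⟨hwW, hndW⟩
    rcases List.mem_cons.mp hv with hv | hv
    · subst hv
      have hrest : W.map g = W.map f :=
        List.map_congr_left (fun u hu => hg u (List.mem_cons_of_mem _ hu)
          (fun e => hwW (e ▸ hu)))
      simp only [List.map_cons, List.sum_cons, hrest, hgv]
      ring
    · have hw : g w = f w := hg w List.mem_cons_self (fun e => hwW (e ▸ hv))
      have := ih hndW hv (fun u hu hne => hg u (List.mem_cons_of_mem _ hu) hne)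
      simp only [List.map_cons, List.sum_cons, hw, this]
      ring

lemma pv_ofList_append {xs : List Int} {v : Int} :
    PySem.Set.ofList (xs ++ [v])
      = if v ∈ xs then PySem.Set.ofList xs else PySem.Set.ofList xs ++ [v] := by
  have h1 : PySem.Set.ofList (xs ++ [v]) = PySem.Set.add (PySem.Set.ofList xs) v := by
    simp [PySem.Set.ofList, List.foldl_append, PySem.Set.add]
  rw [h1]
  unfold PySem.Set.add
  have hc : (PySem.Set.ofList xs).contains v = decide (v ∈ xs) := by
    simp [PySem.Set.contains, PySem.Set.mem_ofList]
  rw [hc]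
  by_cases hm : v ∈ xs <;> simp [hm]

lemma pv_pos_append (w v : Int) (p : Int × Int) (l : List (Int × (Int × Int))) :
    pvPos w (l ++ [(v, p)]) = pvPos w l ++ (if v = w then [p] else []) := by
  simp only [pvPos, List.filter_append, List.map_append]
  congr 1
  by_cases h : v = w <;> simp [h]

lemma pv_core (l : List (Int × (Int × Int))) : pvSum l = pvF PySem.Dict.empty l := by
  induction l using List.reverseRecOn with
  | nil => simp [pvSum, pvF, PySem.Set.ofList, PySem.Set.empty]
  | append_singleton l c ih =>
    obtain ⟨v, p⟩ := c
    rw [pv_F_append]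
    have hempty : (PySem.Dict.empty : PySem.Dict Int (Int × Int)).get? v = none := rfl
    rw [hempty, Option.none_or]
    unfold pvSum
    rw [List.map_append, List.map_cons, List.map_nil, pv_ofList_append]
    by_cases hv : v ∈ l.map (fun c => c.1)
    · rw [if_pos hv]
      -- v occurs in l: its position list is nonempty
      have hne : pvPos v l ≠ [] := by
        rcases List.mem_map.mp hv with ⟨c0, hc0, he⟩
        have : c0 ∈ l.filter (fun c => c.1 == v) := by
          simp [List.mem_filter, hc0, he]
        intro hnil
        simp only [pvPos] at hnil
        rw [List.map_eq_nil_iff] at hnil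
        rw [hnil] at this
        simp at this
      obtain ⟨p0, rest, hps⟩ := List.exists_cons_of_ne_nil hne
      have hfind : (l.find? (fun c => c.1 == v)).map (fun c => c.2) = some p0 := by
        have h1 : (l.filter (fun c => c.1 == v)).head? = l.find? (fun c => c.1 == v) :=
          List.head?_filter
        have h2 : (pvPos v l).head? = ((l.filter (fun c => c.1 == v)).head?).map (fun c => c.2) := by
          simp [pvPos, List.head?_map]
        rw [h1] at h2
        rw [← h2, hps]
        rfl
      rw [hfind]
      have hsum :
          ((PySem.Set.ofList (l.map (fun c => c.1))).map
              (fun w => pvEntry w (pvPos w (l ++ [(v, p)])))).sum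
            = ((PySem.Set.ofList (l.map (fun c => c.1))).map
                (fun w => pvEntry w (pvPos w l))).sum + pvCost p p0 v := by
        apply pv_sum_update (PySem.Set.nodup_ofList _) ((PySem.Set.mem_ofList _ _).mpr hv)
        · intro w hw hne'
          rw [pv_pos_append, if_neg (fun e => hne' e.symm)]
          simp
        · rw [pv_pos_append, if_pos rfl, hps]
          simp [pvEntry]
      rw [hsum]
      have ih' : (List.map (fun w => pvEntry w (pvPos w l)) (PySem.Set.ofList (List.map (fun c => c.1) l))).sum = pvF PySem.Dict.empty l := ih
      rw [ih']
    · rw [if_neg hv]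
      have hfind : l.find? (fun c => c.1 == v) = none := by
        rw [List.find?_eq_none]
        intro x hx
        simp only [beq_iff_eq]
        exact fun e => hv (List.mem_map.mpr ⟨x, hx, e⟩)
      rw [hfind]
      have hposv : pvPos v l = [] := by
        simp only [pvPos, List.map_eq_nil_iff, List.filter_eq_nil_iff]
        intro x hx
        simp only [beq_iff_eq]
        exact fun e => hv (List.mem_map.mpr ⟨x, hx, e⟩)
      rw [List.map_append, List.sum_append]
      have hlast : ([v].map (fun w => pvEntry w (pvPos w (l ++ [(v, p)])))).sum = 0 := by
        simp [pv_pos_append, hposv, pvEntry]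
      rw [hlast]
      have hrest :
          (PySem.Set.ofList (l.map (fun c => c.1))).map
              (fun w => pvEntry w (pvPos w (l ++ [(v, p)])))
            = (PySem.Set.ofList (l.map (fun c => c.1))).map (fun w => pvEntry w (pvPos w l)) := by
        apply List.map_congr_left
        intro w hw
        have hwv : v ≠ w := fun e => hv (e ▸ (PySem.Set.mem_ofList _ _).mp hw)
        rw [pv_pos_append, if_neg hwv]
        simp
      rw [hrest]
      have ih' : (List.map (fun w => pvEntry w (pvPos w l)) (PySem.Set.ofList (List.map (fun c => c.1) l))).sum = pvF PySem.Dict.empty l := ih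
      rw [ih']
      simp

-- ===== VERDICT (by name: the statement is the Claim_ definition above) =====
theorem dist_equals_spec : Claim_equal_dist_equals := by
  intro matrix _
  unfold Spec_dist_equals
  rw [pv_A_norm, pv_B_norm, pv_foldA, pv_core]
  simp
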